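-- pv_equiv track=rewrite | github.com/AndrewShepherd/leetcode-python | minimize-xor/minimize_xor.py | getBitIndexes
-- ===== SOURCE A (Python) =====
-- def getBitIndexes(n):
--     i = 0
--     oneIndexes = []
--     zeroIndexes = []
--     while(n):
--         if n&1:
--             oneIndexes.append(i)
--         else:
--             zeroIndexes.append(i)
--         i+=1
--         n >>= 1
--     return oneIndexes, zeroIndexes
-- ===== SOURCE B (Python) =====
-- def getBitIndexes(n):
--     # Kernighan's trick: extract the set-bit indices by repeatedly clearing
--     # the lowest set bit; zero-bit indices are the complement within bit_length.
--     ones = []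
--     m = n
--     while m:
--         r = m & (m - 1)                      # m with its lowest set bit cleared
--         ones.append((m - r).bit_length() - 1)  # index of that lowest set bit
--         m = r
--     zeroIndexes = [i for i in range(n.bit_length()) if i not in ones]
--     return ones, zeroIndexes
-- ===== Notes on version B (the rewrite author's own statement) =====
-- stated objective: alternative
-- what changed: B extracts the one-bit indexes with Kernighan's lowest-set-bit-clearing trick (m &= m-1, touching only set bits) and then derives the zero-bit indexes as the complement within bit_length, instead of A's single classify-while-shifting loop over all bits.
import Mathlib
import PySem

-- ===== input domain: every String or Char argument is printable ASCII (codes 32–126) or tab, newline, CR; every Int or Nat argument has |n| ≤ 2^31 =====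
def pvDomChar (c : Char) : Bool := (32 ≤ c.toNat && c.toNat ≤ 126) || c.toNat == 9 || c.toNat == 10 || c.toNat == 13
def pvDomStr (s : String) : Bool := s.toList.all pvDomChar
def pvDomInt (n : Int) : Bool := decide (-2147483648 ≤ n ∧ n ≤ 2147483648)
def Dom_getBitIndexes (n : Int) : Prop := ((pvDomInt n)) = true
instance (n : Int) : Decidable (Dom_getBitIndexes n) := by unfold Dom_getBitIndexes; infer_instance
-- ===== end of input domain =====

-- ===== PORT A =====
-- B replaces A's classify-while-shifting scan by Kernighan's lowest-set-bit
-- extraction for the one-indexes plus a complement pass for the zero-indexes.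
-- On negative n both Pythons loop forever (no return), so no Pre_ is needed;
-- both ports map such n through n.toNat = 0 and return ([], []).
-- A's `while(n)` loop: recursion on the shifted value; list appends become conses of the recursive result.
def goA (m : Nat) (i : Int) : List Int × List Int :=
  if h : m = 0 then ([], [])
  else
    let rest := goA (m / 2) (i + 1)
    if m &&& 1 == 1 then (i :: rest.1, rest.2) else (rest.1, i :: rest.2)
decreasing_by exact Nat.div_lt_self (Nat.pos_of_ne_zero h) (by norm_num)

def getBitIndexes (n : Int) : List Int × List Int := goA n.toNat 0

-- ===== PORT B =====
-- n.bit_length() for nonnegative n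
def bitLen (m : Nat) : Nat :=
  if h : m = 0 then 0 else bitLen (m / 2) + 1
decreasing_by exact Nat.div_lt_self (Nat.pos_of_ne_zero h) (by norm_num)

-- B's `while m:` loop: each step clears the lowest set bit (m & (m-1)) and
-- records its index ((m - r).bit_length() - 1).
def goB (m : Nat) : List Nat :=
  if h : m = 0 then []
  else (bitLen (m - (m &&& (m - 1))) - 1) :: goB (m &&& (m - 1))
decreasing_by
  calc m &&& (m - 1) ≤ m - 1 := Nat.and_le_right
    _ < m := by omega

def getBitIndexes_alt (n : Int) : List Int × List Int :=
  let m := n.toNat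
  let ones := goB m
  (ones.map (fun i => (i : Int)),
   ((List.range (bitLen m)).filter (fun i => !(ones.contains i))).map (fun i => (i : Int)))

-- ===== PRECONDITION & SPEC =====
def Spec_getBitIndexes (n : Int) (out : List Int × List Int) : Prop := out = getBitIndexes_alt n
instance (n : Int) (out : List Int × List Int) : Decidable (Spec_getBitIndexes n out) := by unfold Spec_getBitIndexes; infer_instance

-- ===== CLAIM (what is proved, stated in full; the proofs are below) =====
def Claim_equal_getBitIndexes : Prop := ∀ (n : Int), Dom_getBitIndexes n → Spec_getBitIndexes n (getBitIndexes n)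

-- ===== LEMMAS AND PROOFS =====

-- the sorted list of set-bit indices of m (proof-only characterisation)
def bits (m : Nat) : List Nat := (List.range (bitLen m)).filter (Nat.testBit m)

theorem bitLen_succ (m : Nat) (h : m ≠ 0) : bitLen m = bitLen (m / 2) + 1 := by
  rw [bitLen]; simp [h]

theorem bitLen_pos (m : Nat) (h : m ≠ 0) : 1 ≤ bitLen m := by
  rw [bitLen_succ m h]; omega

theorem lt_two_pow_bitLen : ∀ m : Nat, m < 2 ^ bitLen m := by
  intro m
  induction m using Nat.strong_induction_on with
  | _ m ih =>
    by_cases h : m = 0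
    · simp [h, bitLen]
    · have := ih (m / 2) (Nat.div_lt_self (Nat.pos_of_ne_zero h) (by norm_num))
      rw [bitLen_succ m h, pow_succ]
      omega

theorem testBit_lt_bitLen (m j : Nat) (h : Nat.testBit m j = true) : j < bitLen m := by
  have h1 : 2 ^ j ≤ m := Nat.ge_two_pow_of_testBit h
  have h2 : m < 2 ^ bitLen m := lt_two_pow_bitLen m
  exact (Nat.pow_lt_pow_iff_right (by norm_num)).mp (lt_of_le_of_lt h1 h2)

theorem testBit_two_mul (q j : Nat) : Nat.testBit (2 * q) (j + 1) = Nat.testBit q j := by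
  simp [Nat.testBit_add_one]

theorem testBit_two_mul_zero (q : Nat) : Nat.testBit (2 * q) 0 = false := by
  simp [Nat.testBit_zero, Nat.mul_mod_right]

theorem and_pred_odd (m : Nat) (h : m % 2 = 1) : m &&& (m - 1) = m - 1 := by
  apply Nat.eq_of_testBit_eq
  intro j
  rw [Nat.testBit_and]
  cases j with
  | zero =>
    have h0 : (m - 1) % 2 = 0 := by omega
    simp [Nat.testBit_zero, h0]
  | succ j =>
    simp only [Nat.testBit_add_one]
    have h2 : (m - 1) / 2 = m / 2 := by omega
    rw [h2]
    exact Bool.and_self _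

theorem and_pred_two_mul (q : Nat) :
    (2 * q) &&& (2 * q - 1) = 2 * (q &&& (q - 1)) := by
  apply Nat.eq_of_testBit_eq
  intro j
  rw [Nat.testBit_and]
  cases j with
  | zero => simp
  | succ j =>
    simp only [Nat.testBit_add_one]
    have e1 : 2 * q / 2 = q := by omega
    have e2 : (2 * q - 1) / 2 = q - 1 := by omega
    have e3 : 2 * (q &&& (q - 1)) / 2 = q &&& (q - 1) := by omega
    rw [e1, e2, e3, Nat.testBit_and]

theorem bitLen_two_mul (q : Nat) (hq : q ≠ 0) : bitLen (2 * q) = bitLen q + 1 := by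
  rw [bitLen_succ (2 * q) (by omega)]
  have : 2 * q / 2 = q := by omega
  rw [this]

theorem bits_two_mul (q : Nat) : bits (2 * q) = (bits q).map (· + 1) := by
  by_cases hq : q = 0
  · simp [hq, bits, bitLen]
  · unfold bits
    rw [bitLen_two_mul q hq, List.range_succ_eq_map]
    simp only [List.filter_cons, testBit_two_mul_zero, List.filter_map]
    simp [Function.comp_def, testBit_two_mul]

theorem bits_odd (m : Nat) (h : m % 2 = 1) : bits m = 0 :: bits (2 * (m / 2)) := by
  have hm : m ≠ 0 := by omega
  rw [bits_two_mul]
  unfold bits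
  rw [bitLen_succ m hm, List.range_succ_eq_map]
  have h0 : Nat.testBit m 0 = true := by simp [Nat.testBit_zero, h]
  simp only [List.filter_cons, h0, List.filter_map]
  simp [Function.comp_def, Nat.testBit_add_one]

theorem goB_two_mul : ∀ q : Nat, goB (2 * q) = (goB q).map (· + 1) := by
  intro q
  induction q using Nat.strong_induction_on with
  | _ q ih =>
    by_cases hq : q = 0
    · simp [hq, goB]
    · have hr : q &&& (q - 1) ≤ q - 1 := Nat.and_le_right
      have hne : q - (q &&& (q - 1)) ≠ 0 := by omega
      have h2q : ¬(2 * q = 0) := by omega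
      have L : goB (2 * q) =
          (bitLen (2 * q - (2 * q &&& (2 * q - 1))) - 1) :: goB (2 * q &&& (2 * q - 1)) := by
        conv_lhs => rw [goB]
        simp [h2q]
      have R : goB q = (bitLen (q - (q &&& (q - 1))) - 1) :: goB (q &&& (q - 1)) := by
        conv_lhs => rw [goB]
        simp [hq]
      rw [L, R, and_pred_two_mul q, ih (q &&& (q - 1)) (by omega)]
      have hsub : 2 * q - 2 * (q &&& (q - 1)) = 2 * (q - (q &&& (q - 1))) := by omega
      rw [hsub, bitLen_two_mul _ hne]
      simp only [List.map_cons]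
      have := bitLen_pos _ hne
      congr 1
      omega

theorem goB_eq_bits : ∀ m : Nat, goB m = bits m := by
  intro m
  induction m using Nat.strong_induction_on with
  | _ m ih =>
    by_cases hm : m = 0
    · simp [hm, goB, bits, bitLen]
    · by_cases hpar : m % 2 = 1
      · have L : goB m = (bitLen (m - (m &&& (m - 1))) - 1) :: goB (m &&& (m - 1)) := by
          conv_lhs => rw [goB]
          simp [hm]
        rw [L, and_pred_odd m hpar]
        have h1 : m - (m - 1) = 1 := by omega
        have hb1 : bitLen 1 = 1 := by rw [bitLen_succ 1 (by omega)]; simp [bitLen]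
        rw [h1, hb1, ih (m - 1) (by omega), bits_odd m hpar]
        have h2 : 2 * (m / 2) = m - 1 := by omega
        rw [h2]
      · have hrep : m = 2 * (m / 2) := by omega
        conv_lhs => rw [hrep]
        rw [goB_two_mul, ih (m / 2) (by omega), ← bits_two_mul, ← hrep]

theorem mem_bits (m j : Nat) : j ∈ bits m ↔ Nat.testBit m j = true := by
  unfold bits
  rw [List.mem_filter, List.mem_range]
  constructor
  · exact fun h => h.2
  · exact fun h => ⟨testBit_lt_bitLen m j h, h⟩

theorem bitPred_eq_testBit (m j : Nat) : (m >>> j &&& 1 == 1) = Nat.testBit m j := by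
  simp [Nat.testBit, Nat.and_comm]

theorem goA_eq (m : Nat) : ∀ i : Int, goA m i =
    (((List.range (bitLen m)).filter (fun j => m >>> j &&& 1 == 1)).map (fun j => i + (j : Int)),
     ((List.range (bitLen m)).filter (fun j => !(m >>> j &&& 1 == 1))).map (fun j => i + (j : Int))) := by
  induction m using Nat.strong_induction_on with
  | _ m ih =>
    intro i
    rw [goA]
    by_cases h : m = 0
    · simp [h, bitLen]
    · have hr := ih (m / 2) (Nat.div_lt_self (Nat.pos_of_ne_zero h) (by norm_num)) (i + 1)
      have hshift : ∀ j : Nat, m >>> (j + 1) = (m / 2) >>> j := by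
        intro j
        rw [Nat.add_comm, Nat.shiftRight_add, Nat.shiftRight_one]
      have hcast : ∀ j : Nat, i + 1 + (j : Int) = i + ((j : Nat) + 1 : Nat) := by
        intro j; push_cast; ring
      by_cases hb : m % 2 = 1 <;>
        simp [hr, h, bitLen_succ m h, List.range_succ_eq_map, List.filter_map,
          Function.comp_def, hshift, Nat.and_one_is_mod, hb, Nat.shiftRight_zero, hcast,
          List.flatMap_map, Nat.succ_eq_add_one, List.map_flatMap]

-- ===== VERDICT (by name: the statement is the Claim_ definition above) =====
theorem getBitIndexes_spec : Claim_equal_getBitIndexes := by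
  intro n _
  unfold Spec_getBitIndexes getBitIndexes getBitIndexes_alt
  dsimp only
  rw [goA_eq, goB_eq_bits]
  refine Prod.ext ?_ ?_
  · simp only [bits]
    rw [List.filter_congr (fun j _ => bitPred_eq_testBit n.toNat j)]
    simp
  · simp only
    rw [List.filter_congr (l := List.range (bitLen n.toNat))
      (q := fun j => !((bits n.toNat).contains j))
      (fun j _ => by rw [bitPred_eq_testBit]
                     simp [mem_bits])]
    simp
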